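-- pv_equiv track=rewrite | github.com/gracobjo/proyecto_transporte_global_standalone | procesamiento/reconfiguracion_grafo.py | _bfs_python_path
-- ===== SOURCE A (Python) =====
-- from typing import Any, Dict, Iterable, List, Optional, Tuple
--
-- STATUS_DOWN = "DOWN"
--
-- def _bfs_python_path(
--     aristas: Iterable[Tuple[str, str, float]],
--     estados_nodos_rt: Dict[str, Dict[str, Any]],
--     estados_rutas_rt: Dict[str, Dict[str, Any]],
--     origen: str,
--     destino: str,
-- ) -> Optional[List[str]]:
--     if origen == destino:
--         return [origen]
--     if estados_nodos_rt.get(origen, {}).get("status") == STATUS_DOWN: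
--         return None
--     if estados_nodos_rt.get(destino, {}).get("status") == STATUS_DOWN:
--         return None
--     vecinos: Dict[str, List[str]] = {}
--     for src, dst, _ in aristas:
--         route = estados_rutas_rt.get(f"{src}|{dst}") or estados_rutas_rt.get(f"{dst}|{src}") or {}
--         if route.get("status") == STATUS_DOWN:
--             continue
--         if estados_nodos_rt.get(src, {}).get("status") == STATUS_DOWN:
--             continue
--         if estados_nodos_rt.get(dst, {}).get("status") == STATUS_DOWN:
--             continue
--         vecinos.setdefault(src, []).append(dst)
--         vecinos.setdefault(dst, []).append(src)
--     queue: List[List[str]] = [[origen]]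
--     vistos = {origen}
--     while queue:
--         path = queue.pop(0)
--         last = path[-1]
--         for nxt in vecinos.get(last, []):
--             if nxt in vistos:
--                 continue
--             new_path = path + [nxt]
--             if nxt == destino:
--                 return new_path
--             vistos.add(nxt)
--             queue.append(new_path)
--     return None
-- ===== SOURCE B (Python) =====
-- from typing import Any, Dict, Iterable, List, Optional, Tuple
--
-- STATUS_DOWN = "DOWN"
--
-- def _bfs_python_path(
--     aristas: Iterable[Tuple[str, str, float]],
--     estados_nodos_rt: Dict[str, Dict[str, Any]],
--     estados_rutas_rt: Dict[str, Dict[str, Any]],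
--     origen: str,
--     destino: str,
-- ) -> Optional[List[str]]:
--     if origen == destino:
--         return [origen]
--
--     def up(n: str) -> bool:
--         return estados_nodos_rt.get(n, {}).get("status") != STATUS_DOWN
--
--     if not (up(origen) and up(destino)):
--         return None
--     # Stage 1: one pass over the edges keeps the usable ones as directed pairs.
--     pares: List[Tuple[str, str]] = []
--     for src, dst, _ in aristas:
--         route = estados_rutas_rt.get(f"{src}|{dst}") or estados_rutas_rt.get(f"{dst}|{src}") or {}
--         if up(src) and up(dst) and route.get("status") != STATUS_DOWN:
--             pares.append((src, dst))
--             pares.append((dst, src))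
--     # Stage 2: group the pairs into an adjacency map.
--     vecinos: Dict[str, List[str]] = {}
--     for a, b in pares:
--         vecinos.setdefault(a, []).append(b)
--     # Stage 3: BFS with a two-stack O(1)-amortized queue and parent pointers;
--     # the path is rebuilt once, only when destino is reached.
--     parent: Dict[str, str] = {}
--     front: List[str] = [origen]
--     back: List[str] = []
--     while front or back:
--         if not front:
--             front = back[::-1]
--             back = []
--         node = front.pop()
--         for nxt in vecinos.get(node, []):
--             if nxt in parent or nxt == origen:
--                 continue
--             parent[nxt] = node
--             if nxt == destino:
--                 path = [destino]
--                 cur = node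
--                 while cur != origen:
--                     path.append(cur)
--                     cur = parent[cur]
--                 path.append(origen)
--                 path.reverse()
--                 return path
--             back.append(nxt)
--     return None
-- ===== Notes on version B (the rewrite author's own statement) =====
-- stated objective: faster
-- what changed: A keeps a queue of whole paths popped with pop(0); B filters the edges into a pair list first, groups it into the adjacency map, then runs BFS over nodes with a two-stack amortized-O(1) queue and parent pointers, rebuilding the path once when destino is reached instead of copying a path per enqueued node.
import Mathlib
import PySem

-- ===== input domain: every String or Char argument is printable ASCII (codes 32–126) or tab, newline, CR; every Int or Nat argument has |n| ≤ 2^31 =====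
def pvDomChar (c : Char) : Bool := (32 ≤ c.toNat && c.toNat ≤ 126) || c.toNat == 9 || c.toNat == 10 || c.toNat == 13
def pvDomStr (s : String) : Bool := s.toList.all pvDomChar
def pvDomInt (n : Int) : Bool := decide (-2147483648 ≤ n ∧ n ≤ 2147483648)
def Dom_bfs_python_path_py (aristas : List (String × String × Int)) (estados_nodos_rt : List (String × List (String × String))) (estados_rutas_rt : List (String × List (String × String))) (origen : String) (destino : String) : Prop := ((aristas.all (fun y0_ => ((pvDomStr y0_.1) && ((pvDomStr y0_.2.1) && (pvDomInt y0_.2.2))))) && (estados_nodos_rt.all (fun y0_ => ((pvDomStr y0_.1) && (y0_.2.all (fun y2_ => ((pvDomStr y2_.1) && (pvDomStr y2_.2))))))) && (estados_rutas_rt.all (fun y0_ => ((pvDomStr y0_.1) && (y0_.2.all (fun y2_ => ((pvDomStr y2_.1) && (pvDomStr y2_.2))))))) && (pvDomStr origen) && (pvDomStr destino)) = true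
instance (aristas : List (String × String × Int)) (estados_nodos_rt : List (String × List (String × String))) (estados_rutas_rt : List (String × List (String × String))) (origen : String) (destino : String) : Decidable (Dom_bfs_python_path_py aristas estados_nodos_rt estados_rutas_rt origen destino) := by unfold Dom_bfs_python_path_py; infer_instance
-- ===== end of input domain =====

-- B replaces A's queue of whole paths popped with pop(0) by: a pre-filtered directed pair
-- list grouped into the adjacency map, a two-stack queue, and parent pointers with a single
-- path reconstruction at the end (objective: faster — no pop(0) shifting, no path copying).

-- ===== SHARED HELPERS (these Python subexpressions are identical in A and in B) =====
-- estados_nodos_rt.get(n, {}).get("status") == "DOWN"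
def pvNodeDown (en : List (String × List (String × String))) (n : String) : Bool :=
  ((PySem.Dict.mk ((PySem.Dict.mk en).getD n [])).get? "status") == some "DOWN"

-- estados_rutas_rt.get(f"{src}|{dst}") or estados_rutas_rt.get(f"{dst}|{src}") or {}
-- ('or' is Python truthiness: a present but EMPTY dict falls through to the next operand)
def pvRouteFor (er : List (String × List (String × String))) (src dst : String) : List (String × String) :=
  match (PySem.Dict.mk er).get? (PySem.Str.join "|" [src, dst]) with
  | some v =>
    if v.isEmpty then ((PySem.Dict.mk er).get? (PySem.Str.join "|" [dst, src])).getD [] else v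
  | none => ((PySem.Dict.mk er).get? (PySem.Str.join "|" [dst, src])).getD []

def pvRouteDown (er : List (String × List (String × String))) (src dst : String) : Bool :=
  ((PySem.Dict.mk (pvRouteFor er src dst)).get? "status") == some "DOWN"

-- ===== PORT A =====
-- A's adjacency-building loop (vecinos.setdefault(x, []).append(y) is modify x [] (· ++ [y]))
def pvVecinos (aristas : List (String × String × Int)) (en : List (String × List (String × String)))
    (er : List (String × List (String × String))) : PySem.Dict String (List String) :=
  aristas.foldl (fun d e =>
    if pvRouteDown er e.1 e.2.1 || pvNodeDown en e.1 || pvNodeDown en e.2.1 then d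
    else (d.modify e.1 [] (· ++ [e.2.1])).modify e.2.1 [] (· ++ [e.1])) PySem.Dict.empty

-- the body of A's 'for nxt in vecinos.get(last, [])' loop (early return = Sum.inl)
def pvInnerA (destino : String) (path : List String) :
    List String → List (List String) → PySem.Set String →
    (List String) ⊕ (List (List String) × PySem.Set String)
  | [], queue, vistos => Sum.inr (queue, vistos)
  | nxt :: rest, queue, vistos =>
    if PySem.Set.contains vistos nxt then pvInnerA destino path rest queue vistos
    else if nxt == destino then Sum.inl (path ++ [nxt])
    else pvInnerA destino path rest (queue ++ [path ++ [nxt]]) (PySem.Set.add vistos nxt)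

-- A's 'while queue' loop; the fuel counts iterations and is never exhausted
-- (each iteration pops one path, and at most 1 + 2*len(aristas) paths are ever enqueued)
def pvLoopA (vec : PySem.Dict String (List String)) (destino : String) :
    Nat → List (List String) → PySem.Set String → Option (List String)
  | 0, _, _ => none
  | _ + 1, [], _ => none
  | fuel + 1, path :: rest, vistos =>
    let last := PySem.List.pyGetD path (-1) ""   -- path[-1]; paths are nonempty, so exact
    match pvInnerA destino path (vec.getD last []) rest vistos with
    | Sum.inl p => some p
    | Sum.inr (q, v) => pvLoopA vec destino fuel q v

def bfs_python_path_py (aristas : List (String × String × Int)) (estados_nodos_rt : List (String × List (String × String))) (estados_rutas_rt : List (String × List (String × String))) (origen : String) (destino : String) : Option (List String) :=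
  if origen == destino then some [origen]
  else if pvNodeDown estados_nodos_rt origen then none
  else if pvNodeDown estados_nodos_rt destino then none
  else
    pvLoopA (pvVecinos aristas estados_nodos_rt estados_rutas_rt) destino
      (2 + 2 * aristas.length) [[origen]] (PySem.Set.ofList [origen])

-- ===== PORT B =====
-- estados_nodos_rt.get(n, {}).get("status") != "DOWN"   (B's helper 'up')
def pvNodeUp (en : List (String × List (String × String))) (n : String) : Bool :=
  ((PySem.Dict.mk ((PySem.Dict.mk en).getD n [])).get? "status") != some "DOWN"

-- route.get("status") != "DOWN"
def pvRouteUp (er : List (String × List (String × String))) (src dst : String) : Bool :=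
  ((PySem.Dict.mk (pvRouteFor er src dst)).get? "status") != some "DOWN"

-- Stage 1: the usable edges as directed pairs (two appends per kept edge)
def pvPares (aristas : List (String × String × Int)) (en : List (String × List (String × String)))
    (er : List (String × List (String × String))) : List (String × String) :=
  aristas.foldl (fun acc e =>
    if pvNodeUp en e.1 && pvNodeUp en e.2.1 && pvRouteUp er e.1 e.2.1 then
      (acc ++ [(e.1, e.2.1)]) ++ [(e.2.1, e.1)]
    else acc) []

-- Stage 2: group the pairs into the adjacency map
def pvVecB (pares : List (String × String)) : PySem.Dict String (List String) :=
  pares.foldl (fun d p => d.modify p.1 [] (· ++ [p.2])) PySem.Dict.empty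

-- B's 'while cur != origen' parent-chain walk; fuel = parent.size + 1 bounds the chain.
-- (parent[cur] cannot raise KeyError here: every chained non-origen node has a parent;
-- the 'none' arm is unreachable and returns the list built so far)
def pvRebuild (parent : PySem.Dict String String) (origen : String) :
    Nat → String → List String → List String
  | 0, _, acc => acc
  | fuel + 1, cur, acc =>
    if cur == origen then acc ++ [origen]
    else match parent.get? cur with
      | some p => pvRebuild parent origen fuel p (acc ++ [cur])
      | none => acc ++ [cur]

-- the body of B's 'for nxt in vecinos.get(node, [])' loop
def pvInnerB (origen destino node : String) :
    List String → List String → PySem.Dict String String →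
    (List String) ⊕ (List String × PySem.Dict String String)
  | [], back, parent => Sum.inr (back, parent)
  | nxt :: rest, back, parent =>
    if parent.contains nxt || nxt == origen then pvInnerB origen destino node rest back parent
    else
      let parent' := parent.insert nxt node
      if nxt == destino then
        Sum.inl ((pvRebuild parent' origen (parent'.size + 1) node [destino]).reverse)
      else pvInnerB origen destino node rest (back ++ [nxt]) parent'

-- Stage 3: B's 'while front or back' loop over the two-stack queue (same fuel device as A:
-- one pop per iteration, at most 1 + 2*len(aristas) nodes are ever pushed)
def pvLoopB (vec : PySem.Dict String (List String)) (origen destino : String) :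
    Nat → List String → List String → PySem.Dict String String → Option (List String)
  | 0, _, _, _ => none
  | fuel + 1, front, back, parent =>
    if front.isEmpty && back.isEmpty then none
    else
      -- if not front: front = back[::-1]; back = []   (xs[::-1] reverses: PySem.List.slice?_none_none_neg_one)
      let front₁ := if front.isEmpty then back.reverse else front
      let back₁ := if front.isEmpty then [] else back
      match PySem.List.pop? front₁ with   -- node = front.pop(); front₁ is nonempty, so exact
      | none => none
      | some (node, front₂) =>
        match pvInnerB origen destino node (vec.getD node []) back₁ parent with
        | Sum.inl p => some p
        | Sum.inr (back₂, parent₂) => pvLoopB vec origen destino fuel front₂ back₂ parent₂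

def bfs_python_path_py_alt (aristas : List (String × String × Int)) (estados_nodos_rt : List (String × List (String × String))) (estados_rutas_rt : List (String × List (String × String))) (origen : String) (destino : String) : Option (List String) :=
  if origen == destino then some [origen]
  else if !(pvNodeUp estados_nodos_rt origen && pvNodeUp estados_nodos_rt destino) then none
  else
    pvLoopB (pvVecB (pvPares aristas estados_nodos_rt estados_rutas_rt)) origen destino
      (2 + 2 * aristas.length) [origen] [] PySem.Dict.empty

-- ===== PRECONDITION & SPEC =====
def Spec_bfs_python_path_py (aristas : List (String × String × Int)) (estados_nodos_rt : List (String × List (String × String))) (estados_rutas_rt : List (String × List (String × String))) (origen : String) (destino : String) (out : Option (List String)) : Prop := out = bfs_python_path_py_alt aristas estados_nodos_rt estados_rutas_rt origen destino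
instance (aristas : List (String × String × Int)) (estados_nodos_rt : List (String × List (String × String))) (estados_rutas_rt : List (String × List (String × String))) (origen : String) (destino : String) (out : Option (List String)) : Decidable (Spec_bfs_python_path_py aristas estados_nodos_rt estados_rutas_rt origen destino out) := by unfold Spec_bfs_python_path_py; infer_instance

-- ===== CLAIM (what is proved, stated in full; the proofs are below) =====
def Claim_equal_bfs_python_path_py : Prop := ∀ (aristas : List (String × String × Int)) (estados_nodos_rt : List (String × List (String × String))) (estados_rutas_rt : List (String × List (String × String))) (origen : String) (destino : String), Dom_bfs_python_path_py aristas estados_nodos_rt estados_rutas_rt origen destino → Spec_bfs_python_path_py aristas estados_nodos_rt estados_rutas_rt origen destino (bfs_python_path_py aristas estados_nodos_rt estados_rutas_rt origen destino)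

-- ===== LEMMAS AND PROOFS =====

-- B's filtering condition is the negation of A's skipping condition
theorem pvUp_eq_not_down (en er : List (String × List (String × String))) (s d : String) :
    (pvNodeUp en s && pvNodeUp en d && pvRouteUp er s d)
      = !(pvRouteDown er s d || pvNodeDown en s || pvNodeDown en d) := by
  simp only [pvNodeUp, pvRouteUp, pvNodeDown, pvRouteDown, bne]
  cases (PySem.Dict.mk ((PySem.Dict.mk en).getD s [])).get? "status" == some "DOWN" <;>
    cases (PySem.Dict.mk ((PySem.Dict.mk en).getD d [])).get? "status" == some "DOWN" <;>
    cases (PySem.Dict.mk (pvRouteFor er s d)).get? "status" == some "DOWN" <;> rfl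

-- Stage 1's fold normalizes: the accumulator is only appended to
theorem pvPares_acc (en er : List (String × List (String × String))) :
    ∀ (l : List (String × String × Int)) (acc : List (String × String)),
    l.foldl (fun acc e =>
      if pvNodeUp en e.1 && pvNodeUp en e.2.1 && pvRouteUp er e.1 e.2.1 then
        (acc ++ [(e.1, e.2.1)]) ++ [(e.2.1, e.1)]
      else acc) acc
    = acc ++ l.foldl (fun acc e =>
      if pvNodeUp en e.1 && pvNodeUp en e.2.1 && pvRouteUp er e.1 e.2.1 then
        (acc ++ [(e.1, e.2.1)]) ++ [(e.2.1, e.1)]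
      else acc) [] := by
  intro l
  induction l with
  | nil => intro acc; simp
  | cons e l ih =>
    intro acc
    have h1 := ih (if pvNodeUp en e.1 && pvNodeUp en e.2.1 && pvRouteUp er e.1 e.2.1 then
      (acc ++ [(e.1, e.2.1)]) ++ [(e.2.1, e.1)] else acc)
    have h2 := ih (if pvNodeUp en e.1 && pvNodeUp en e.2.1 && pvRouteUp er e.1 e.2.1 then
      (([] : List (String × String)) ++ [(e.1, e.2.1)]) ++ [(e.2.1, e.1)] else [])
    simp only [List.foldl_cons]
    rw [h1, h2]
    split_ifs <;> simp

theorem pvVec_eq (en er : List (String × List (String × String))) :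
    ∀ (l : List (String × String × Int)) (d : PySem.Dict String (List String)),
    (l.foldl (fun acc e =>
      if pvNodeUp en e.1 && pvNodeUp en e.2.1 && pvRouteUp er e.1 e.2.1 then
        (acc ++ [(e.1, e.2.1)]) ++ [(e.2.1, e.1)]
      else acc) []).foldl (fun d p => d.modify p.1 [] (· ++ [p.2])) d
    = l.foldl (fun d e =>
      if pvRouteDown er e.1 e.2.1 || pvNodeDown en e.1 || pvNodeDown en e.2.1 then d
      else (d.modify e.1 [] (· ++ [e.2.1])).modify e.2.1 [] (· ++ [e.1])) d := by
  intro l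
  induction l with
  | nil => intro d; rfl
  | cons e l ih =>
    intro d
    simp only [List.foldl_cons]
    rw [pvPares_acc, List.foldl_append, ← ih]
    rw [pvUp_eq_not_down en er e.1 e.2.1]
    cases h : pvRouteDown er e.1 e.2.1 || pvNodeDown en e.1 || pvNodeDown en e.2.1 <;> simp

theorem pvVecinos_eq (aristas : List (String × String × Int))
    (en er : List (String × List (String × String))) :
    pvVecB (pvPares aristas en er) = pvVecinos aristas en er := by
  unfold pvVecB pvPares pvVecinos
  exact pvVec_eq en er aristas PySem.Dict.empty

-- the parent chain from n down to origen (excluded endpoints: l ends with origen)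
inductive pvChain (parent : PySem.Dict String String) (origen : String) : String → List String → Prop
  | base : pvChain parent origen origen []
  | step {n p : String} {l : List String} :
      n ≠ origen → parent.get? n = some p → pvChain parent origen p l →
      pvChain parent origen n (p :: l)

-- how a path in A's queue corresponds to a node in B's queue
def pvR (parent : PySem.Dict String String) (origen : String) (vistos : PySem.Set String)
    (path : List String) (n : String) : Prop :=
  ∃ l, pvChain parent origen n l ∧ path = (n :: l).reverse ∧
    (∀ m ∈ n :: l, m ∈ vistos) ∧ l.length ≤ parent.size

theorem pvRebuild_eq {parent : PySem.Dict String String} {origen n : String} {l : List String}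
    (h : pvChain parent origen n l) : ∀ (fuel : Nat), l.length < fuel → ∀ acc,
    pvRebuild parent origen fuel n acc = acc ++ (n :: l) := by
  induction h with
  | base =>
    intro fuel hf acc
    match fuel, hf with
    | f + 1, _ => simp [pvRebuild]
  | @step n p l hn hg hc ih =>
    intro fuel hf acc
    match fuel, hf with
    | f + 1, hf =>
      have h2 := ih f (by simp at hf; omega) (acc ++ [n])
      simp [pvRebuild, hn, hg, h2]

theorem pvChain_insert {parent : PySem.Dict String String} {origen : String}
    {vistos : PySem.Set String} {n x v : String} {l : List String}
    (hx : x ∉ vistos) (hm : ∀ m ∈ n :: l, m ∈ vistos) (h : pvChain parent origen n l) :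
    pvChain (parent.insert x v) origen n l := by
  induction h with
  | base => exact pvChain.base
  | @step n p l hn hg hc ih =>
    have hne : n ≠ x := fun he => hx (by rw [← he]; exact hm n (by simp))
    refine pvChain.step hn ?_ (ih (fun m hm' => hm m (by simp at hm' ⊢; tauto)))
    rw [PySem.Dict.get?_insert_of_ne _ _ hne]; exact hg

-- preservation of pvR by one fresh insert + visited mark
theorem pvR_insert {parent : PySem.Dict String String} {origen : String}
    {vistos : PySem.Set String} {path : List String} {n x v : String}
    (hx : x ∉ vistos) (h : pvR parent origen vistos path n) :
    pvR (parent.insert x v) origen (PySem.Set.add vistos x) path n := by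
  obtain ⟨l, hc, hp, hm, hlen⟩ := h
  refine ⟨l, pvChain_insert hx hm hc, hp, ?_, ?_⟩
  · intro m hm'; exact (PySem.Set.mem_add _ _ _).mpr (Or.inl (hm m hm'))
  · have := PySem.Dict.size_insert parent x v
    rw [this]; split <;> omega

theorem pvForall₂_snoc {α β : Type} {R : α → β → Prop} {l₁ : List α} {l₂ : List β}
    {a : α} {b : β} (h : List.Forall₂ R l₁ l₂) (hab : R a b) :
    List.Forall₂ R (l₁ ++ [a]) (l₂ ++ [b]) := by
  induction h with
  | nil => exact List.Forall₂.cons hab List.Forall₂.nil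
  | cons hx _ ih => exact List.Forall₂.cons hx ih

-- the inner for-loops of A and B run in lockstep (F is the untouched rest of B's front)
theorem pvInner_eq (origen destino : String) (ns : List String) :
    ∀ (path : List String) (node : String) (qA : List (List String)) (F back : List String)
      (parent : PySem.Dict String String) (vistos : PySem.Set String),
    pvR parent origen vistos path node →
    List.Forall₂ (pvR parent origen vistos) qA (F ++ back) →
    (∀ x, x ∈ vistos ↔ (parent.contains x = true ∨ x = origen)) →
    destino ∉ vistos →
    (match pvInnerA destino path ns qA vistos, pvInnerB origen destino node ns back parent with
     | Sum.inl p, Sum.inl p' => p = p'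
     | Sum.inr (qA', v), Sum.inr (back', par') =>
         List.Forall₂ (pvR par' origen v) qA' (F ++ back') ∧
         (∀ x, x ∈ v ↔ (par'.contains x = true ∨ x = origen)) ∧
         destino ∉ v
     | _, _ => False) := by
  induction ns with
  | nil =>
    intro path node qA F back parent vistos hR hF hV hD
    simp only [pvInnerA, pvInnerB]
    exact ⟨hF, hV, hD⟩
  | cons nxt rest ih =>
    intro path node qA F back parent vistos hR hF hV hD
    by_cases hv : nxt ∈ vistos
    · have hcA : PySem.Set.contains vistos nxt = true := (PySem.Set.contains_iff _ _).mpr hv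
      have hcB : (parent.contains nxt || nxt == origen) = true := by
        rcases (hV nxt).mp hv with h | h
        · simp [h]
        · simp [h]
      simp only [pvInnerA, pvInnerB, hcA, hcB, if_pos]
      exact ih path node qA F back parent vistos hR hF hV hD
    · have hcA : PySem.Set.contains vistos nxt = false := by
        cases hcc : PySem.Set.contains vistos nxt
        · rfl
        · exact absurd ((PySem.Set.contains_iff _ _).mp hcc) hv
      have hcont : parent.contains nxt = false := by
        cases hcc : parent.contains nxt
        · rfl
        · exact absurd ((hV nxt).mpr (Or.inl hcc)) hv
      have hno : nxt ≠ origen := fun he => hv ((hV nxt).mpr (Or.inr he))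
      have hcB : (parent.contains nxt || nxt == origen) = false := by
        simp [hcont, hno]
      by_cases hd : nxt = destino
      · -- both sides return: A's path ++ [nxt] is B's rebuilt-and-reversed chain ++ [nxt]
        subst hd
        obtain ⟨l, hchain, hpath, hm, hlen⟩ := hR
        have hchain' : pvChain (parent.insert nxt node) origen node l :=
          pvChain_insert hv hm hchain
        have hsz : parent.size ≤ (parent.insert nxt node).size := by
          have := PySem.Dict.size_insert parent nxt node
          rw [this]; split <;> omega
        have hreb := pvRebuild_eq hchain' ((parent.insert nxt node).size + 1)
          (by omega) [nxt]
        simp only [pvInnerA, pvInnerB, hcA, hcB]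
        simp [hreb, hpath]
      · -- both sides skip or enqueue nxt / path ++ [nxt]
        have hne : (nxt == destino) = false := by simp [hd]
        simp only [pvInnerA, pvInnerB, hcA, hcB, hne, Bool.false_eq_true, if_false]
        have hR' : pvR (parent.insert nxt node) origen (PySem.Set.add vistos nxt) path node :=
          pvR_insert hv hR
        have hnew : pvR (parent.insert nxt node) origen (PySem.Set.add vistos nxt)
            (path ++ [nxt]) nxt := by
          obtain ⟨l, hchain, hpath, hm, hlen⟩ := hR
          refine ⟨node :: l, pvChain.step hno (PySem.Dict.get?_insert_self _ _ _)
            (pvChain_insert hv hm hchain), by simp [hpath], ?_, ?_⟩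
          · intro m hm'
            rw [PySem.Set.mem_add]
            rcases List.mem_cons.mp hm' with h1 | h2
            · exact Or.inr h1
            · exact Or.inl (hm m h2)
          · rw [PySem.Dict.size_insert, hcont]
            simp only [List.length_cons, Bool.false_eq_true, if_false]
            omega
        have hF' : List.Forall₂ (pvR (parent.insert nxt node) origen (PySem.Set.add vistos nxt))
            (qA ++ [path ++ [nxt]]) (F ++ (back ++ [nxt])) := by
          rw [← List.append_assoc]
          exact pvForall₂_snoc (hF.imp (fun _ _ hr => pvR_insert hv hr)) hnew
        have hV' : ∀ x, x ∈ PySem.Set.add vistos nxt ↔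
            ((parent.insert nxt node).contains x = true ∨ x = origen) := by
          intro x
          rw [PySem.Set.mem_add, PySem.Dict.contains_insert]
          constructor
          · rintro (h | h)
            · rcases (hV x).mp h with h1 | h1
              · exact Or.inl (by simp [h1])
              · exact Or.inr h1
            · exact Or.inl (by simp [h])
          · rintro (h | h)
            · rcases Bool.or_eq_true_iff.mp h with h1 | h1
              · exact Or.inr (by simpa using h1)
              · exact Or.inl ((hV x).mpr (Or.inl h1))
            · exact Or.inl ((hV x).mpr (Or.inr h))
        have hD' : destino ∉ PySem.Set.add vistos nxt := by
          rw [PySem.Set.mem_add]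
          rintro (h | h)
          · exact hD h
          · exact hd h.symm
        exact ih path node (qA ++ [path ++ [nxt]]) F (back ++ [nxt]) _ _ hR' hF' hV' hD'

-- the outer loops of A and B run in lockstep (one pop per unit of fuel on both sides)
theorem pvLoop_eq (vec : PySem.Dict String (List String)) (origen destino : String) :
    ∀ (fuel : Nat) (qA : List (List String)) (vistos : PySem.Set String)
      (front back : List String) (parent : PySem.Dict String String),
    List.Forall₂ (pvR parent origen vistos) qA (front.reverse ++ back) →
    (∀ x, x ∈ vistos ↔ (parent.contains x = true ∨ x = origen)) →
    destino ∉ vistos →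
    pvLoopA vec destino fuel qA vistos = pvLoopB vec origen destino fuel front back parent := by
  intro fuel
  induction fuel with
  | zero => intro qA vistos front back parent _ _ _; rfl
  | succ fuel ih =>
    intro qA vistos front back parent hF hV hD
    cases qA with
    | nil =>
      have hnil : front.reverse ++ back = [] := List.forall₂_nil_left_iff.mp hF
      have h1 : front = [] := by
        have := List.append_eq_nil_iff.mp hnil
        simpa using this.1
      have h2 : back = [] := (List.append_eq_nil_iff.mp hnil).2
      subst h1; subst h2
      simp [pvLoopA, pvLoopB]
    | cons path restA =>
      obtain ⟨node, t, hR, hF', hdi⟩ := List.forall₂_cons_left_iff.mp hF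
      have hemp : (front.isEmpty && back.isEmpty) = false := by
        cases hf : front <;> cases hb : back <;> subst hf <;> subst hb <;>
          simp_all
      have hfb : (if front.isEmpty then back.reverse else front).reverse
          ++ (if front.isEmpty then [] else back) = front.reverse ++ back := by
        cases front <;> simp
      -- the nonempty working front, split at its last element
      have hrevne : (if front.isEmpty then back.reverse else front).reverse
          ++ (if front.isEmpty then [] else back) = node :: t := by rw [hfb, hdi]
      have hf1ne : (if front.isEmpty then back.reverse else front) ≠ [] := by
        intro h
        rw [h] at hrevne
        cases front <;> simp_all
      -- name the working front and decompose it at its last element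
      set frontW := (if front.isEmpty then back.reverse else front) with hW
      set backW := (if front.isEmpty then [] else back) with hBW
      have hWrev : frontW = frontW.reverse.reverse := by simp
      have hWcons : ∃ h tl, frontW.reverse = h :: tl := by
        cases hc : frontW.reverse with
        | nil => exact absurd (by simpa using hc) hf1ne
        | cons h tl => exact ⟨h, tl, rfl⟩
      obtain ⟨hd₀, tl₀, hWr⟩ := hWcons
      have hWeq : frontW = tl₀.reverse ++ [hd₀] := by
        rw [hWrev, hWr]; simp
      have hhd : hd₀ = node ∧ tl₀ ++ backW = t := by
        have : frontW.reverse ++ backW = node :: t := hrevne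
        rw [hWr] at this
        simp only [List.cons_append] at this
        exact ⟨List.head_eq_of_cons_eq this, List.tail_eq_of_cons_eq this⟩
      obtain ⟨hhd₁, hhd₂⟩ := hhd
      have hpop : PySem.List.pop? frontW = some (node, tl₀.reverse) := by
        rw [hWeq, hhd₁]
        exact PySem.List.pop?_last _ _
      have hlast : PySem.List.pyGetD path (-1) "" = node := by
        obtain ⟨l, _, hpath, _, _⟩ := hR
        rw [hpath]
        simp
      have hF2 : List.Forall₂ (pvR parent origen vistos) restA (tl₀ ++ backW) := by
        rw [hhd₂]; exact hF'
      have hinner := pvInner_eq origen destino (vec.getD node []) path node restA tl₀ backW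
        parent vistos hR hF2 hV hD
      simp only [pvLoopA, pvLoopB, hemp, Bool.false_eq_true, if_false, hlast]
      rw [← hW, ← hBW, hpop]
      rcases hA : pvInnerA destino path (vec.getD node []) restA vistos with p | ⟨qA', v⟩ <;>
        rcases hB : pvInnerB origen destino node (vec.getD node []) backW parent
          with p' | ⟨back₂, parent₂⟩ <;>
        rw [hA, hB] at hinner <;> simp only [hB] <;> simp only at hinner
      · exact congrArg some hinner
      · obtain ⟨hF3, hV3, hD3⟩ := hinner
        exact ih qA' v tl₀.reverse back₂ parent₂ (by simpa using hF3) hV3 hD3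

theorem pv_main (aristas : List (String × String × Int))
    (en er : List (String × List (String × String))) (origen destino : String) :
    bfs_python_path_py aristas en er origen destino
      = bfs_python_path_py_alt aristas en er origen destino := by
  unfold bfs_python_path_py bfs_python_path_py_alt
  by_cases h0 : origen == destino
  · simp [h0]
  · have hguard : (!(pvNodeUp en origen && pvNodeUp en destino))
        = (pvNodeDown en origen || pvNodeDown en destino) := by
      simp only [pvNodeUp, pvNodeDown, bne]
      cases (PySem.Dict.mk ((PySem.Dict.mk en).getD origen [])).get? "status" == some "DOWN" <;>
        cases (PySem.Dict.mk ((PySem.Dict.mk en).getD destino [])).get? "status" == some "DOWN" <;> rfl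
    simp only [h0, Bool.false_eq_true, if_false, hguard]
    by_cases h1 : pvNodeDown en origen
    · simp [h1]
    · by_cases h2 : pvNodeDown en destino
      · simp [h1, h2]
      · simp only [h1, h2, Bool.or_self, Bool.false_eq_true, if_false]
        rw [pvVecinos_eq]
        apply pvLoop_eq
        · refine List.Forall₂.cons ?_ List.Forall₂.nil
          refine ⟨[], pvChain.base, by simp, ?_, ?_⟩
          · intro m hm
            simp only [List.mem_singleton] at hm
            rw [hm, PySem.Set.mem_ofList]
            simp
          · simp [PySem.Dict.size_empty]
        · intro x
          rw [PySem.Set.mem_ofList]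
          simp [PySem.Dict.contains_empty, eq_comm]
        · rw [PySem.Set.mem_ofList]
          simpa [eq_comm] using (by simpa using h0 : ¬ origen = destino)

-- ===== VERDICT (by name: the statement is the Claim_ definition above) =====
theorem bfs_python_path_py_spec : Claim_equal_bfs_python_path_py := by
  intro aristas en er origen destino _
  unfold Spec_bfs_python_path_py
  exact pv_main aristas en er origen destino
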